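-- pv_equiv track=rewrite | github.com/jeppeter/extargsparse | src/extargsparse/__lib_debug__.py | __slash_string
-- ===== SOURCE A (Python) =====
-- def __slash_string(s):
--     outs =''
--     for c in s:
--         if c == '\\':
--             outs += '\\\\'
--         else:
--             outs += c
--     return outs
-- ===== SOURCE B (Python) =====
-- def __slash_string(s):
--     return '\\\\'.join(s.split('\\'))
-- ===== Notes on version B (the rewrite author's own statement) =====
-- stated objective: idiomatic
-- what changed: Replaces the per-character loop with branch and string accumulation by a single split on backslash followed by a join with a doubled-backslash separator (C-level str.split/str.join instead of per-character interpreted work).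
import Mathlib
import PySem

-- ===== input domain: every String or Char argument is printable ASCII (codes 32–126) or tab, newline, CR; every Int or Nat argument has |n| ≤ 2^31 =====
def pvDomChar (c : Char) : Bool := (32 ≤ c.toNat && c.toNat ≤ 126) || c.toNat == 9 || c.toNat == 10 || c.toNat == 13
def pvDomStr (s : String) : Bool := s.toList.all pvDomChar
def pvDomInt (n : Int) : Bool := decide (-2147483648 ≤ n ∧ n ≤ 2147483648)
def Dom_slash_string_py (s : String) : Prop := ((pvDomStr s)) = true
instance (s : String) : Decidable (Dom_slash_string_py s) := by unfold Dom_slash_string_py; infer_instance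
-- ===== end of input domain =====

-- B is the idiomatic split-then-join: '\\\\'.join(s.split('\\')); A is the per-character loop. Return values proved equal on Dom.

-- ===== PORT A =====
-- per-character loop: outs += '\\\\' if c == '\\' else c
def slash_string_py (s : String) : String :=
  String.mk (s.toList.foldl (fun outs c => outs ++ (if c = '\\' then ['\\', '\\'] else [c])) [])

-- ===== PORT B =====
-- '\\\\'.join(s.split('\\')) — split on the 1-char separator, join with the doubled one
def slash_string_py_alt (s : String) : String :=
  String.mk (PySem.Chars.join ['\\', '\\'] (PySem.Chars.splitOn s.toList ['\\']))

-- ===== PRECONDITION & SPEC =====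
def Spec_slash_string_py (s : String) (out : String) : Prop := out = slash_string_py_alt s
instance (s : String) (out : String) : Decidable (Spec_slash_string_py s out) := by unfold Spec_slash_string_py; infer_instance

-- ===== CLAIM (what is proved, stated in full; the proofs are below) =====
def Claim_equal_slash_string_py : Prop := ∀ (s : String), Dom_slash_string_py s → Spec_slash_string_py s (slash_string_py s)

-- ===== LEMMAS AND PROOFS =====

/-- A simple structural recursion equivalent to `splitOn.go` on the 1-char separator `['\\']`. -/
def pvSplit (cur l : List Char) : List (List Char) :=
  match l with
  | [] => [cur.reverse]
  | c :: rest => if c = '\\' then cur.reverse :: pvSplit [] rest else pvSplit (c :: cur) rest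

theorem pvSplit_ne_nil (cur l : List Char) : pvSplit cur l ≠ [] := by
  induction l generalizing cur with
  | nil => simp [pvSplit]
  | cons c rest ih => by_cases h : c = '\\' <;> simp [pvSplit, h] <;> exact ih _

theorem go_eq_pvSplit (fuel : Nat) (l cur : List Char) (acc : List (List Char))
    (h : l.length < fuel) :
    PySem.Chars.splitOn.go ['\\'] fuel l cur acc = acc.reverse ++ pvSplit cur l := by
  induction fuel generalizing l cur acc with
  | zero => omega
  | succ n ih =>
    cases l with
    | nil => simp [PySem.Chars.splitOn.go, pvSplit]
    | cons c rest =>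
      by_cases hc : c = '\\'
      · subst hc
        rw [show PySem.Chars.splitOn.go ['\\'] (n+1) ('\\' :: rest) cur acc
              = PySem.Chars.splitOn.go ['\\'] n rest [] (cur.reverse :: acc) by
            simp [PySem.Chars.splitOn.go, List.isPrefixOf]]
        rw [ih rest [] (cur.reverse :: acc) (by simpa using Nat.lt_of_succ_lt_succ h)]
        simp [pvSplit]
      · have hpre : List.isPrefixOf ['\\'] (c :: rest) = false := by
          simp [List.isPrefixOf]; exact fun h => hc h.symm
        rw [show PySem.Chars.splitOn.go ['\\'] (n+1) (c :: rest) cur acc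
              = PySem.Chars.splitOn.go ['\\'] n rest (c :: cur) acc by
            simp [PySem.Chars.splitOn.go, hpre]]
        rw [ih rest (c :: cur) acc (by simpa using Nat.lt_of_succ_lt_succ h)]
        simp [pvSplit, hc]

theorem splitOn_eq_pvSplit (l : List Char) :
    PySem.Chars.splitOn l ['\\'] = pvSplit [] l := by
  have := go_eq_pvSplit (l.length + 1) l [] [] (by omega)
  simpa [PySem.Chars.splitOn] using this

theorem join_pvSplit (cur l : List Char) :
    PySem.Chars.join ['\\', '\\'] (pvSplit cur l)
      = cur.reverse ++ l.flatMap (fun c => if c = '\\' then ['\\', '\\'] else [c]) := by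
  induction l generalizing cur with
  | nil => simp [pvSplit, PySem.Chars.join, List.intercalate]
  | cons c rest ih =>
    by_cases hc : c = '\\'
    · subst hc
      obtain ⟨p, ps, hps⟩ := List.exists_cons_of_ne_nil (pvSplit_ne_nil ([] : List Char) rest)
      rw [show pvSplit cur ('\\' :: rest) = cur.reverse :: pvSplit [] rest from by simp [pvSplit]]
      rw [hps, PySem.Chars.join_cons_cons, ← hps, ih []]
      simp
    · simp only [pvSplit, if_neg hc]
      rw [ih (c :: cur)]
      simp [hc]

-- ===== VERDICT (by name: the statement is the Claim_ definition above) =====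
theorem slash_string_py_spec : Claim_equal_slash_string_py := by
  intro s _
  show slash_string_py s = slash_string_py_alt s
  unfold slash_string_py slash_string_py_alt
  rw [PySem.List.foldl_append_eq_flatMap, splitOn_eq_pvSplit, join_pvSplit]
  simp
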